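-- pv_equiv track=rewrite | github.com/cgvvxx/PS | programmers/programmers_92344.py | solution
-- ===== SOURCE A (Python) =====
-- def solution(board, skill):
--
--     n = len(board)
--     m = len(board[0])
--     psum = [[0] * (m+1) for _ in range(n+1)]
--
--     for typ, r1, c1, r2, c2, degree in skill:
--
--         degree *= (-1)**typ
--
--         psum[r1][c1] += degree
--         psum[r2+1][c1] += -degree
--         psum[r1][c2+1] += -degree
--         psum[r2+1][c2+1] += degree
--
--     for i in range(n):
--         for j in range(m):
--             psum[i][j+1] += psum[i][j]
--
--     for j in range(m):
--         for i in range(n):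
--             psum[i+1][j] += psum[i][j]
--
--     ans = 0
--     for i in range(n):
--         for j in range(m):
--             board[i][j] += psum[i][j]
--
--             if board[i][j] > 0:
--                 ans += 1
--
--     return ans
-- ===== SOURCE B (Python) =====
-- def solution(board, skill):
--     # Direct per-rectangle updates instead of a 2D difference/prefix-sum table.
--     # Mutates board in place like A does. Only the first m = len(board[0])
--     # columns of each row are counted, exactly as A's final loop does.
--     m = len(board[0])
--     for typ, r1, c1, r2, c2, degree in skill:
--         d = -degree if typ % 2 else degree
--         for i in range(r1, r2 + 1):
--             row = board[i]
--             for j in range(c1, c2 + 1):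
--                 row[j] += d
--     return sum(1 for row in board for v in row[:m] if v > 0)
-- ===== Notes on version B (the rewrite author's own statement) =====
-- stated objective: simpler
-- what changed: B replaces A's 2D difference-array + two prefix-sum passes over an (n+1)x(m+1) auxiliary table by direct brute-force rectangle additions into the board itself, then counts positive cells with a single comprehension.
-- outside the precondition, e.g. on solution([[1]], [[1, -1, 0, -1, 0, 5]]): A returns 1, B returns 0; on solution([[1], [1]], [[0, 1, 0, -1, 0, 5]]): A returns 1, B returns 2; on solution([[1]], [[-1, 0, 0, 0, 0, 1]]): A returns 0, B returns 0
import Mathlib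
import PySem

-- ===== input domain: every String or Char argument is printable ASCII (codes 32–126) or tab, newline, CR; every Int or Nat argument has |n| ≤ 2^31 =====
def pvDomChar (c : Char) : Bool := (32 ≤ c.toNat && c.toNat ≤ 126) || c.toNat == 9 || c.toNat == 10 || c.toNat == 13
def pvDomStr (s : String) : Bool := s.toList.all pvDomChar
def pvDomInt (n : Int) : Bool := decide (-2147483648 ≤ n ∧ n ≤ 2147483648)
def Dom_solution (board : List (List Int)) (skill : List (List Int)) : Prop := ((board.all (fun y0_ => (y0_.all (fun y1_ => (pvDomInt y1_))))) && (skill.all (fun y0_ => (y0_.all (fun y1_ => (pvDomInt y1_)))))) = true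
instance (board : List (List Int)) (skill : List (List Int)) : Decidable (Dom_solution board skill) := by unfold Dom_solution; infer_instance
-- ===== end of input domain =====

-- B replaces A's 2D difference/prefix-sum table by direct per-rectangle adds into the board
-- (objective: simpler). Both A and B mutate `board` in place in Python; on the stated domain
-- the final board contents agree, and the theorems below are about the RETURN value.

-- ===== PORT A =====
-- p[i][j] read with default (in range under Pre_): exact where Python indexes succeed
def pvGetI (p : List (List Int)) (i j : Int) : Int :=
  PySem.List.pyGetD (PySem.List.pyGetD p i []) j 0

-- p[i][j] += v  (total form of Python's in-range update; Pre_ keeps all indices in range)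
def pvBump (p : List (List Int)) (i j v : Int) : List (List Int) :=
  PySem.List.pySetD p i
    (PySem.List.pySetD (PySem.List.pyGetD p i []) j (pvGetI p i j + v))

-- inner body of A's row prefix pass: for j in range(m): psum[i][j+1] += psum[i][j]
def pvRowLoop (m : Int) (p : List (List Int)) (i : Int) : List (List Int) :=
  (PySem.List.pyRange 0 m 1).foldl (fun p j => pvBump p i (j + 1) (pvGetI p i j)) p

-- inner body of A's column prefix pass: for i in range(n): psum[i+1][j] += psum[i][j]
def pvColLoop (n : Int) (p : List (List Int)) (j : Int) : List (List Int) :=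
  (PySem.List.pyRange 0 n 1).foldl (fun p i => pvBump p (i + 1) j (pvGetI p i j)) p

-- one skill application to the difference array psum (loop body of A's first loop)
def pvSkillStepA (p : List (List Int)) (s : List Int) : List (List Int) :=
  match s with
  | [typ, r1, c1, r2, c2, degree] =>
    -- degree *= (-1)**typ ; exact for 0 ≤ typ (Pre_; negative typ goes through floats in Python)
    let degree := degree * (-1 : Int) ^ typ.toNat
    pvBump (pvBump (pvBump (pvBump p r1 c1 degree)
      (r2 + 1) c1 (-degree)) r1 (c2 + 1) (-degree)) (r2 + 1) (c2 + 1) degree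
  | _ => p    -- any other length raises on unpacking; Pre_ excludes it

-- body of A's final counting loop: board[i][j] += psum[i][j]; if board[i][j] > 0: ans += 1
def pvCellStep (p3 : List (List Int)) (i : Int) (st : List (List Int) × Int) (j : Int) :
    List (List Int) × Int :=
  let b := pvBump st.1 i j (pvGetI p3 i j)
  (b, if pvGetI b i j > 0 then st.2 + 1 else st.2)

def pvCountRow (m : Int) (p3 : List (List Int)) (st : List (List Int) × Int) (i : Int) :
    List (List Int) × Int :=
  (PySem.List.pyRange 0 m 1).foldl (pvCellStep p3 i) st

def solution (board : List (List Int)) (skill : List (List Int)) : Int :=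
  let n : Int := PySem.List.len board
  let m : Int := PySem.List.len (PySem.List.pyGetD board 0 [])
  let p0 : List (List Int) := List.replicate (n + 1).toNat (List.replicate (m + 1).toNat (0 : Int))
  let p1 := skill.foldl pvSkillStepA p0
  let p2 := (PySem.List.pyRange 0 n 1).foldl (pvRowLoop m) p1
  let p3 := (PySem.List.pyRange 0 m 1).foldl (pvColLoop n) p2
  let st := (PySem.List.pyRange 0 n 1).foldl (pvCountRow m p3) (board, (0 : Int))
  st.2

-- ===== PORT B =====
-- for j in range(c1, c2+1): row[j] += d
def pvRowAdd (row : List Int) (c1 c2 d : Int) : List Int :=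
  (PySem.List.pyRange c1 (c2 + 1) 1).foldl
    (fun r j => PySem.List.pySetD r j (PySem.List.pyGetD r j 0 + d)) row

-- for i in range(r1, r2+1): add d on columns c1..c2 of board[i]
def pvRectAdd (b : List (List Int)) (r1 c1 r2 c2 d : Int) : List (List Int) :=
  (PySem.List.pyRange r1 (r2 + 1) 1).foldl
    (fun b i => PySem.List.pySetD b i (pvRowAdd (PySem.List.pyGetD b i []) c1 c2 d)) b

-- one skill applied directly to the board (loop body of B's single skill loop)
def pvSkillStepB (b : List (List Int)) (s : List Int) : List (List Int) :=
  match s with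
  | [typ, r1, c1, r2, c2, degree] =>
    let d := if PySem.Int.mod typ 2 = 0 then degree else -degree
    pvRectAdd b r1 c1 r2 c2 d
  | _ => b

def solution_alt (board : List (List Int)) (skill : List (List Int)) : Int :=
  let m : Int := PySem.List.len (PySem.List.pyGetD board 0 [])
  let b := skill.foldl pvSkillStepB board
  Int.ofNat ((b.map (fun row =>
    (PySem.List.slice row none (some m)).countP (fun v => decide (v > 0)))).sum)

-- ===== PRECONDITION & SPEC =====
-- one skill entry [typ, r1, c1, r2, c2, degree] of the puzzle's domain (N rows, M columns):
-- nonnegative typ (A's (-1)**typ goes through floats for typ < 0), and a rectangle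
-- 0 ≤ r1 ≤ r2+1 ≤ N, 0 ≤ c1 ≤ c2+1 ≤ M (possibly empty), so no index wraps or raises
def SkillOK (N M : Int) (s : List Int) : Prop :=
  s.length = 6 ∧ 0 ≤ s.getD 0 0 ∧
  0 ≤ s.getD 1 0 ∧ s.getD 1 0 - 1 ≤ s.getD 3 0 ∧ s.getD 3 0 < N ∧ s.getD 1 0 ≤ N ∧
  0 ≤ s.getD 2 0 ∧ s.getD 2 0 - 1 ≤ s.getD 4 0 ∧ s.getD 4 0 < M ∧ s.getD 2 0 ≤ M

-- Pre_ is the puzzle's natural domain: a nonempty board whose rows all have at least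
-- len(board[0]) cells, and in-bounds skills.
-- Outside it A raises (empty board, short skill rows, far out-of-range indices) or returns a
-- value through accidents of its implementation (negative-index wraparound into psum, the
-- float result of (-1)**typ for typ < 0, crossed rectangles r2+1 < r1).
def Pre_solution (board : List (List Int)) (skill : List (List Int)) : Prop :=
  board ≠ [] ∧
  (∀ i < board.length, (board.getD 0 []).length ≤ (board.getD i []).length) ∧
  ∀ s ∈ skill, SkillOK (board.length : Int) ((board.getD 0 []).length : Int) s

instance (board : List (List Int)) (skill : List (List Int)) :
    Decidable (Pre_solution board skill) := by unfold Pre_solution SkillOK; infer_instance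

def pvWitness_solution : List (List Int) × List (List Int) :=
  ([[1, 2], [-1, 0]], [[1, 0, 0, 1, 1, 3]])

def Spec_solution (board : List (List Int)) (skill : List (List Int)) (out : Int) : Prop := out = solution_alt board skill
instance (board : List (List Int)) (skill : List (List Int)) (out : Int) : Decidable (Spec_solution board skill out) := by unfold Spec_solution; infer_instance

-- ===== CLAIM (what is proved, stated in full; the proofs are below) =====
def Claim_equal_solution : Prop := ∀ (board : List (List Int)) (skill : List (List Int)), Dom_solution board skill → Pre_solution board skill → Spec_solution board skill (solution board skill)

-- ===== LEMMAS AND PROOFS =====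

-- matrix cell read used throughout the proofs
def g2 (p : List (List Int)) (i j : Nat) : Int := (p.getD i []).getD j 0

-- rectangular shape R×C, stated through getD
def Shape (p : List (List Int)) (R C : Nat) : Prop :=
  p.length = R ∧ ∀ i < R, C ≤ (p.getD i []).length

theorem getD_set'' {α : Type} (xs : List α) (r : Nat) (v : α) (i : Nat) (d : α) :
    (xs.set r v).getD i d = if r = i ∧ i < xs.length then v else xs.getD i d := by
  simp [List.getD, List.getElem?_set]
  split_ifs <;> simp_all

theorem pvGetI_natCast (p : List (List Int)) (i j : Nat) :
    pvGetI p (i : Int) (j : Int) = g2 p i j := by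
  simp [pvGetI, g2]

theorem g2_pvBump {R C : Nat} {p : List (List Int)} (hp : Shape p R C) (r c : Int)
    (hr0 : 0 ≤ r) (hrR : r < (R : Int)) (hc0 : 0 ≤ c) (hcC : c < (C : Int)) (v : Int) :
    Shape (pvBump p r c v) R C ∧ ∀ i j : Nat,
      g2 (pvBump p r c v) i j = g2 p i j + if (i : Int) = r ∧ (j : Int) = c then v else 0 := by
  obtain ⟨rn, rfl⟩ : ∃ k : Nat, r = (k : Int) := ⟨r.toNat, (Int.toNat_of_nonneg hr0).symm⟩
  obtain ⟨cn, rfl⟩ : ∃ k : Nat, c = (k : Int) := ⟨c.toNat, (Int.toNat_of_nonneg hc0).symm⟩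
  have hrn : rn < R := by exact_mod_cast hrR
  have hcn : cn < C := by exact_mod_cast hcC
  have hlen : p.length = R := hp.1
  have hrow : C ≤ (p.getD rn []).length := hp.2 rn hrn
  have hb : pvBump p (rn : Int) (cn : Int) v =
      p.set rn ((p.getD rn []).set cn ((p.getD rn []).getD cn 0 + v)) := by
    simp [pvBump, pvGetI]
  rw [hb]
  refine ⟨⟨by simp [hlen], ?_⟩, ?_⟩
  · intro i hi
    rw [getD_set'']
    split_ifs with h
    · rw [List.length_set]; exact hrow
    · exact hp.2 i hi
  · intro i j
    unfold g2
    rw [getD_set'']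
    by_cases hi : rn = i
    · subst hi
      rw [if_pos ⟨rfl, by omega⟩, getD_set'']
      by_cases hj : cn = j
      · subst hj
        rw [if_pos ⟨rfl, by omega⟩, if_pos ⟨rfl, rfl⟩]
      · rw [if_neg (fun hc => hj hc.1),
            if_neg (fun hc => hj (by exact_mod_cast hc.2.symm))]
        simp
    · rw [if_neg (fun hc => hi hc.1),
          if_neg (fun hc => hi (by exact_mod_cast hc.1.symm))]
      simp

theorem sum_ind (r : Int) (i : Nat) :
    (∑ k ∈ Finset.range (i + 1), if (k : Int) = r then (1 : Int) else 0) =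
      if 0 ≤ r ∧ r ≤ (i : Int) then 1 else 0 := by
  induction i with
  | zero =>
    rw [Finset.sum_range_succ, Finset.sum_range_zero]
    split_ifs <;> omega
  | succ n ih =>
    rw [Finset.sum_range_succ, ih]
    push_cast
    split_ifs <;> omega

-- sign of (-1)**typ
def sgn (t : Int) : Int := if PySem.Int.mod t 2 = 0 then 1 else -1

theorem pow_neg_one (t : Int) (h : 0 ≤ t) : (-1 : Int) ^ t.toNat = sgn t := by
  obtain ⟨k, rfl⟩ : ∃ k : Nat, t = (k : Int) := ⟨t.toNat, (Int.toNat_of_nonneg h).symm⟩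
  have hmod : PySem.Int.mod (k : Int) 2 = ((k % 2 : Nat) : Int) := PySem.Int.mod_natCast k 2
  unfold sgn
  rw [hmod, Int.toNat_natCast]
  rcases Nat.even_or_odd k with he | ho
  · rw [he.neg_one_pow]
    have : k % 2 = 0 := Nat.even_iff.mp he
    simp [this]
  · rw [ho.neg_one_pow]
    have : k % 2 = 1 := Nat.odd_iff.mp ho
    simp [this]

-- per-skill contribution to the difference array, and to a cell of the final board
def diffC (s : List Int) (i j : Int) : Int :=
  sgn (s.getD 0 0) * s.getD 5 0 *
    ((if i = s.getD 1 0 then 1 else 0) - (if i = s.getD 3 0 + 1 then 1 else 0)) *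
    ((if j = s.getD 2 0 then 1 else 0) - (if j = s.getD 4 0 + 1 then 1 else 0))

def addC (s : List Int) (i j : Int) : Int :=
  if s.getD 1 0 ≤ i ∧ i ≤ s.getD 3 0 ∧ s.getD 2 0 ≤ j ∧ j ≤ s.getD 4 0 then
    sgn (s.getD 0 0) * s.getD 5 0 else 0

def tot (skill : List (List Int)) (i j : Int) : Int := (skill.map (fun s => addC s i j)).sum

theorem rowLoopAux (N M : Nat) (p : List (List Int)) (hp : Shape p (N + 1) (M + 1))
    (ii : Nat) (hii : ii ≤ N) :
    ∀ t : Nat, t ≤ M →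
      Shape ((PySem.List.pyRange 0 (t : Int) 1).foldl
          (fun q j => pvBump q (ii : Int) (j + 1) (pvGetI q (ii : Int) j)) p) (N + 1) (M + 1) ∧
      ∀ i j : Nat,
        g2 ((PySem.List.pyRange 0 (t : Int) 1).foldl
            (fun q j => pvBump q (ii : Int) (j + 1) (pvGetI q (ii : Int) j)) p) i j =
          if i = ii ∧ j ≤ t then ∑ k ∈ Finset.range (j + 1), g2 p ii k else g2 p i j := by
  intro t
  induction t with
  | zero =>
    intro _
    rw [show ((0 : Nat) : Int) = 0 by simp, PySem.List.pyRange_one_eq_nil (le_refl 0)]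
    refine ⟨hp, ?_⟩
    intro i j
    simp only [List.foldl_nil]
    split_ifs with h
    · obtain ⟨rfl, hj⟩ := h
      have : j = 0 := by omega
      subst this
      simp
    · rfl
  | succ t iht =>
    intro ht
    have ht' : t ≤ M := by omega
    obtain ⟨hShape, hcell⟩ := iht ht'
    have hsplit : PySem.List.pyRange 0 ((t + 1 : Nat) : Int) 1 =
        PySem.List.pyRange 0 (t : Int) 1 ++ [(t : Int)] := by
      rw [show (((t + 1 : Nat)) : Int) = (t : Int) + 1 by push_cast; ring]
      exact PySem.List.pyRange_one_succ_right (by positivity)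
    rw [hsplit, List.foldl_append]
    set q := (PySem.List.pyRange 0 (t : Int) 1).foldl
      (fun q j => pvBump q (ii : Int) (j + 1) (pvGetI q (ii : Int) j)) p with hq
    simp only [List.foldl_cons, List.foldl_nil]
    have hread : pvGetI q (ii : Int) (t : Int) = ∑ k ∈ Finset.range (t + 1), g2 p ii k := by
      rw [pvGetI_natCast, hcell ii t, if_pos ⟨rfl, le_refl t⟩]
    have hb := g2_pvBump hShape (ii : Int) ((t : Int) + 1)
      (by positivity) (by push_cast; omega) (by positivity) (by push_cast; omega)
      (pvGetI q (ii : Int) (t : Int))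
    refine ⟨hb.1, ?_⟩
    intro i j
    rw [hb.2 i j, hcell i j, hread]
    split_ifs
    all_goals try (exfalso; omega)
    all_goals try ring
    all_goals
      (have h' : i = ii := by omega
       have h'' : j = t + 1 := by omega
       subst h'
       subst h''
       rw [show (1 : Nat) + (t + 1) = (1 + t) + 1 from by omega, Finset.sum_range_succ,
           show (1 : Nat) + t = t + 1 from by omega]
       ring)

theorem phaseA2 (N M : Nat) (p1 : List (List Int)) (hp : Shape p1 (N + 1) (M + 1)) :
    ∀ t : Nat, t ≤ N →
      Shape ((PySem.List.pyRange 0 (t : Int) 1).foldl (pvRowLoop (M : Int)) p1) (N + 1) (M + 1) ∧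
      ∀ i j : Nat,
        g2 ((PySem.List.pyRange 0 (t : Int) 1).foldl (pvRowLoop (M : Int)) p1) i j =
          if i < t ∧ j ≤ M then ∑ l ∈ Finset.range (j + 1), g2 p1 i l else g2 p1 i j := by
  intro t
  induction t with
  | zero =>
    intro _
    rw [show ((0 : Nat) : Int) = 0 by simp, PySem.List.pyRange_one_eq_nil (le_refl 0)]
    exact ⟨hp, fun i j => by simp⟩
  | succ t iht =>
    intro ht
    obtain ⟨hShape, hcell⟩ := iht (by omega)
    have hsplit : PySem.List.pyRange 0 ((t + 1 : Nat) : Int) 1 =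
        PySem.List.pyRange 0 (t : Int) 1 ++ [(t : Int)] := by
      rw [show (((t + 1 : Nat)) : Int) = (t : Int) + 1 by push_cast; ring]
      exact PySem.List.pyRange_one_succ_right (by positivity)
    rw [hsplit, List.foldl_append]
    set q := (PySem.List.pyRange 0 (t : Int) 1).foldl (pvRowLoop (M : Int)) p1 with hq
    simp only [List.foldl_cons, List.foldl_nil]
    have hrow := rowLoopAux N M q hShape t (by omega) M (le_refl M)
    have hpv : pvRowLoop (M : Int) q (t : Int) =
        (PySem.List.pyRange 0 (M : Int) 1).foldl
          (fun q j => pvBump q (t : Int) (j + 1) (pvGetI q (t : Int) j)) q := rfl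
    rw [hpv]
    refine ⟨hrow.1, ?_⟩
    intro i j
    rw [hrow.2 i j]
    by_cases hi : i = t
    · subst hi
      by_cases hj : j ≤ M
      · rw [if_pos (show i = i ∧ j ≤ M from ⟨rfl, hj⟩),
            if_pos (show i < i + 1 ∧ j ≤ M from ⟨by omega, hj⟩)]
        refine Finset.sum_congr rfl ?_
        intro k _
        rw [hcell i k, if_neg (show ¬ (i < i ∧ k ≤ M) from by omega)]
      · rw [if_neg (show ¬ (i = i ∧ j ≤ M) from by omega), hcell i j,
            if_neg (show ¬ (i < i ∧ j ≤ M) from by omega),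
            if_neg (show ¬ (i < i + 1 ∧ j ≤ M) from by omega)]
    · rw [if_neg (show ¬ (i = t ∧ j ≤ M) from fun hc => hi hc.1), hcell i j]
      by_cases hjM : j ≤ M
      · by_cases hit : i < t
        · rw [if_pos ⟨hit, hjM⟩, if_pos ⟨by omega, hjM⟩]
        · have hy : ¬ i < t + 1 := by omega
          rw [if_neg (fun hc => hit hc.1), if_neg (fun hc => hy hc.1)]
      · rw [if_neg (fun hc => hjM hc.2), if_neg (fun hc => hjM hc.2)]

theorem colLoopAux (N M : Nat) (p : List (List Int)) (hp : Shape p (N + 1) (M + 1))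
    (jj : Nat) (hjj : jj ≤ M) :
    ∀ t : Nat, t ≤ N →
      Shape ((PySem.List.pyRange 0 (t : Int) 1).foldl
          (fun q i => pvBump q (i + 1) (jj : Int) (pvGetI q i (jj : Int))) p) (N + 1) (M + 1) ∧
      ∀ i j : Nat,
        g2 ((PySem.List.pyRange 0 (t : Int) 1).foldl
            (fun q i => pvBump q (i + 1) (jj : Int) (pvGetI q i (jj : Int))) p) i j =
          if j = jj ∧ i ≤ t then ∑ k ∈ Finset.range (i + 1), g2 p k jj else g2 p i j := by
  intro t
  induction t with
  | zero =>
    intro _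
    rw [show ((0 : Nat) : Int) = 0 by simp, PySem.List.pyRange_one_eq_nil (le_refl 0)]
    refine ⟨hp, ?_⟩
    intro i j
    simp only [List.foldl_nil]
    split_ifs with h
    · obtain ⟨rfl, hi⟩ := h
      have : i = 0 := by omega
      subst this
      simp
    · rfl
  | succ t iht =>
    intro ht
    obtain ⟨hShape, hcell⟩ := iht (by omega)
    have hsplit : PySem.List.pyRange 0 ((t + 1 : Nat) : Int) 1 =
        PySem.List.pyRange 0 (t : Int) 1 ++ [(t : Int)] := by
      rw [show (((t + 1 : Nat)) : Int) = (t : Int) + 1 by push_cast; ring]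
      exact PySem.List.pyRange_one_succ_right (by positivity)
    rw [hsplit, List.foldl_append]
    set q := (PySem.List.pyRange 0 (t : Int) 1).foldl
      (fun q i => pvBump q (i + 1) (jj : Int) (pvGetI q i (jj : Int))) p with hq
    simp only [List.foldl_cons, List.foldl_nil]
    have hread : pvGetI q (t : Int) (jj : Int) = ∑ k ∈ Finset.range (t + 1), g2 p k jj := by
      rw [pvGetI_natCast, hcell t jj, if_pos ⟨rfl, le_refl t⟩]
    have hb := g2_pvBump hShape ((t : Int) + 1) (jj : Int)
      (by positivity) (by push_cast; omega) (by positivity) (by push_cast; omega)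
      (pvGetI q (t : Int) (jj : Int))
    refine ⟨hb.1, ?_⟩
    intro i j
    rw [hb.2 i j, hcell i j, hread]
    split_ifs
    all_goals try (exfalso; omega)
    all_goals try ring
    all_goals
      (have h' : j = jj := by omega
       have h'' : i = t + 1 := by omega
       subst h'
       subst h''
       rw [show (1 : Nat) + (t + 1) = (1 + t) + 1 from by omega, Finset.sum_range_succ,
           show (1 : Nat) + t = t + 1 from by omega]
       ring)

theorem phaseA3 (N M : Nat) (p2 : List (List Int)) (hp : Shape p2 (N + 1) (M + 1)) :
    ∀ t : Nat, t ≤ M →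
      Shape ((PySem.List.pyRange 0 (t : Int) 1).foldl (pvColLoop (N : Int)) p2) (N + 1) (M + 1) ∧
      ∀ i j : Nat,
        g2 ((PySem.List.pyRange 0 (t : Int) 1).foldl (pvColLoop (N : Int)) p2) i j =
          if j < t ∧ i ≤ N then ∑ k ∈ Finset.range (i + 1), g2 p2 k j else g2 p2 i j := by
  intro t
  induction t with
  | zero =>
    intro _
    rw [show ((0 : Nat) : Int) = 0 by simp, PySem.List.pyRange_one_eq_nil (le_refl 0)]
    exact ⟨hp, fun i j => by simp⟩
  | succ t iht =>
    intro ht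
    obtain ⟨hShape, hcell⟩ := iht (by omega)
    have hsplit : PySem.List.pyRange 0 ((t + 1 : Nat) : Int) 1 =
        PySem.List.pyRange 0 (t : Int) 1 ++ [(t : Int)] := by
      rw [show (((t + 1 : Nat)) : Int) = (t : Int) + 1 by push_cast; ring]
      exact PySem.List.pyRange_one_succ_right (by positivity)
    rw [hsplit, List.foldl_append]
    set q := (PySem.List.pyRange 0 (t : Int) 1).foldl (pvColLoop (N : Int)) p2 with hq
    simp only [List.foldl_cons, List.foldl_nil]
    have hcol := colLoopAux N M q hShape t (by omega) N (le_refl N)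
    have hpv : pvColLoop (N : Int) q (t : Int) =
        (PySem.List.pyRange 0 (N : Int) 1).foldl
          (fun q i => pvBump q (i + 1) (t : Int) (pvGetI q i (t : Int))) q := rfl
    rw [hpv]
    refine ⟨hcol.1, ?_⟩
    intro i j
    rw [hcol.2 i j]
    by_cases hj : j = t
    · subst hj
      by_cases hi : i ≤ N
      · rw [if_pos (show j = j ∧ i ≤ N from ⟨rfl, hi⟩),
            if_pos (show j < j + 1 ∧ i ≤ N from ⟨by omega, hi⟩)]
        refine Finset.sum_congr rfl ?_
        intro k _
        rw [hcell k j, if_neg (show ¬ (j < j ∧ k ≤ N) from by omega)]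
      · rw [if_neg (show ¬ (j = j ∧ i ≤ N) from by omega), hcell i j,
            if_neg (show ¬ (j < j ∧ i ≤ N) from by omega),
            if_neg (show ¬ (j < j + 1 ∧ i ≤ N) from by omega)]
    · rw [if_neg (show ¬ (j = t ∧ i ≤ N) from fun hc => hj hc.1), hcell i j]
      by_cases hiN : i ≤ N
      · by_cases hjt : j < t
        · rw [if_pos ⟨hjt, hiN⟩, if_pos ⟨by omega, hiN⟩]
        · have hy : ¬ j < t + 1 := by omega
          rw [if_neg (fun hc => hjt hc.1), if_neg (fun hc => hy hc.1)]
      · rw [if_neg (fun hc => hiN hc.2), if_neg (fun hc => hiN hc.2)]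

theorem skill_shape (s : List Int) (h : s.length = 6) :
    ∃ t r1 c1 r2 c2 d : Int, s = [t, r1, c1, r2, c2, d] := by
  rcases s with _ | ⟨a, _ | ⟨b, _ | ⟨c, _ | ⟨e, _ | ⟨f, _ | ⟨g, _ | ⟨x, s⟩⟩⟩⟩⟩⟩⟩ <;>
    first
    | exact ⟨_, _, _, _, _, _, rfl⟩
    | simp at h

theorem ite_and_mul (P Q : Prop) [Decidable P] [Decidable Q] (v : Int) :
    (if P ∧ Q then v else 0) =
      (if P then (1 : Int) else 0) * ((if Q then (1 : Int) else 0) * v) := by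
  by_cases hP : P <;> by_cases hQ : Q <;> simp [hP, hQ]

theorem sgn_mul (t d : Int) :
    (if PySem.Int.mod t 2 = 0 then d else -d) = sgn t * d := by
  unfold sgn; split_ifs <;> ring

theorem phaseA1 (N M : Nat) (skill : List (List Int))
    (hsk : ∀ s ∈ skill, SkillOK (N : Int) (M : Int) s) :
    ∀ p, Shape p (N + 1) (M + 1) →
      Shape (skill.foldl pvSkillStepA p) (N + 1) (M + 1) ∧
      ∀ i j : Nat, i ≤ N → j ≤ M →
        g2 (skill.foldl pvSkillStepA p) i j
          = g2 p i j + (skill.map (fun s => diffC s (i : Int) (j : Int))).sum := by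
  induction skill with
  | nil => intro p hp; exact ⟨hp, by simp⟩
  | cons s rest ih =>
    intro p hp
    have hs := hsk s (by simp)
    obtain ⟨t, r1, c1, r2, c2, d, rfl⟩ := skill_shape s hs.1
    obtain ⟨-, ht, hr10, hr12, hr2N, hr1N, hc10, hc12, hc2M, hc1M⟩ := hs
    simp only [List.getD_cons_zero, List.getD_cons_succ] at ht hr10 hr12 hr2N hr1N hc10 hc12 hc2M hc1M
    have hstep : pvSkillStepA p [t, r1, c1, r2, c2, d] =
        pvBump (pvBump (pvBump (pvBump p r1 c1 (d * sgn t))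
          (r2 + 1) c1 (-(d * sgn t))) r1 (c2 + 1) (-(d * sgn t))) (r2 + 1) (c2 + 1) (d * sgn t) := by
      simp only [pvSkillStepA, pow_neg_one t ht]
    have hb1 := g2_pvBump hp r1 c1 hr10 (by push_cast; omega) hc10 (by push_cast; omega) (d * sgn t)
    have hb2 := g2_pvBump hb1.1 (r2 + 1) c1 (by omega) (by push_cast; omega) hc10 (by push_cast; omega) (-(d * sgn t))
    have hb3 := g2_pvBump hb2.1 r1 (c2 + 1) hr10 (by push_cast; omega) (by omega) (by push_cast; omega) (-(d * sgn t))
    have hb4 := g2_pvBump hb3.1 (r2 + 1) (c2 + 1) (by omega) (by push_cast; omega) (by omega) (by push_cast; omega) (d * sgn t)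
    have hq : Shape (pvSkillStepA p [t, r1, c1, r2, c2, d]) (N + 1) (M + 1) := by
      rw [hstep]; exact hb4.1
    have hrest := ih (fun s hm => hsk s (List.mem_cons_of_mem _ hm)) _ hq
    refine ⟨by simpa using hrest.1, ?_⟩
    intro i j hi hj
    rw [List.foldl_cons, hrest.2 i j hi hj, hstep]
    rw [hb4.2, hb3.2, hb2.2, hb1.2]
    simp only [List.map_cons, List.sum_cons]
    have hd : diffC [t, r1, c1, r2, c2, d] (i : Int) (j : Int) =
        sgn t * d *
          ((if (i : Int) = r1 then 1 else 0) - (if (i : Int) = r2 + 1 then 1 else 0)) *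
          ((if (j : Int) = c1 then 1 else 0) - (if (j : Int) = c2 + 1 then 1 else 0)) := rfl
    rw [hd]
    rw [ite_and_mul ((i : Int) = r1) ((j : Int) = c1),
        ite_and_mul ((i : Int) = r2 + 1) ((j : Int) = c1),
        ite_and_mul ((i : Int) = r1) ((j : Int) = c2 + 1),
        ite_and_mul ((i : Int) = r2 + 1) ((j : Int) = c2 + 1)]
    ring


theorem sum_sum_diffC_one (N M : Nat) (s : List Int) (hs : SkillOK (N : Int) (M : Int) s)
    (i j : Nat) :
    (∑ k ∈ Finset.range (i + 1), ∑ l ∈ Finset.range (j + 1), diffC s (k : Int) (l : Int)) =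
      addC s (i : Int) (j : Int) := by
  obtain ⟨-, ht, hr10, hr12, hr2N, hr1N, hc10, hc12, hc2M, hc1M⟩ := hs
  unfold diffC addC
  set e := sgn (s.getD 0 0) * s.getD 5 0 with he
  set r1 := s.getD 1 0
  set r2 := s.getD 3 0
  set c1 := s.getD 2 0
  set c2 := s.getD 4 0
  have hcol : ∀ k : Nat,
      (∑ l ∈ Finset.range (j + 1),
        e * ((if (k : Int) = r1 then 1 else 0) - (if (k : Int) = r2 + 1 then 1 else 0)) *
          ((if (l : Int) = c1 then 1 else 0) - (if (l : Int) = c2 + 1 then 1 else 0))) =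
      e * ((if (k : Int) = r1 then 1 else 0) - (if (k : Int) = r2 + 1 then 1 else 0)) *
        ((if c1 ≤ (j : Int) then 1 else 0) - (if c2 + 1 ≤ (j : Int) then 1 else 0)) := by
    intro k
    rw [← Finset.mul_sum, Finset.sum_sub_distrib, sum_ind, sum_ind]
    have h1 : (0 ≤ c1 ∧ c1 ≤ (j : Int)) ↔ c1 ≤ (j : Int) := by omega
    have h2 : (0 ≤ c2 + 1 ∧ c2 + 1 ≤ (j : Int)) ↔ c2 + 1 ≤ (j : Int) := by omega
    rw [if_congr h1 rfl rfl, if_congr h2 rfl rfl]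
  calc (∑ k ∈ Finset.range (i + 1), ∑ l ∈ Finset.range (j + 1),
        e * ((if (k : Int) = r1 then 1 else 0) - (if (k : Int) = r2 + 1 then 1 else 0)) *
          ((if (l : Int) = c1 then 1 else 0) - (if (l : Int) = c2 + 1 then 1 else 0)))
      = ∑ k ∈ Finset.range (i + 1),
          e * ((if (k : Int) = r1 then 1 else 0) - (if (k : Int) = r2 + 1 then 1 else 0)) *
            ((if c1 ≤ (j : Int) then 1 else 0) - (if c2 + 1 ≤ (j : Int) then 1 else 0)) := by
        exact Finset.sum_congr rfl fun k _ => hcol k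
    _ = (∑ k ∈ Finset.range (i + 1),
          ((if (k : Int) = r1 then 1 else 0) - (if (k : Int) = r2 + 1 then (1:Int) else 0))) *
          (e * ((if c1 ≤ (j : Int) then 1 else 0) - (if c2 + 1 ≤ (j : Int) then 1 else 0))) := by
        rw [Finset.sum_mul]
        refine Finset.sum_congr rfl fun k _ => by ring
    _ = if r1 ≤ (i : Int) ∧ (i : Int) ≤ r2 ∧ c1 ≤ (j : Int) ∧ (j : Int) ≤ c2 then e else 0 := by
        rw [Finset.sum_sub_distrib, sum_ind, sum_ind]
        have h1 : (0 ≤ r1 ∧ r1 ≤ (i : Int)) ↔ r1 ≤ (i : Int) := by omega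
        have h2 : (0 ≤ r2 + 1 ∧ r2 + 1 ≤ (i : Int)) ↔ r2 + 1 ≤ (i : Int) := by omega
        rw [if_congr h1 rfl rfl, if_congr h2 rfl rfl]
        split_ifs
        all_goals try ring
        all_goals (exfalso; omega)

theorem sum_sum_add (n m : Nat) (a b : Nat → Nat → Int) :
    (∑ k ∈ Finset.range n, ∑ l ∈ Finset.range m, (a k l + b k l)) =
      (∑ k ∈ Finset.range n, ∑ l ∈ Finset.range m, a k l) +
      (∑ k ∈ Finset.range n, ∑ l ∈ Finset.range m, b k l) := by
  rw [← Finset.sum_add_distrib]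
  exact Finset.sum_congr rfl fun k _ => Finset.sum_add_distrib

theorem sum_sum_diffC (N M : Nat) (skill : List (List Int))
    (hsk : ∀ s ∈ skill, SkillOK (N : Int) (M : Int) s)
    (i j : Nat) :
    (∑ k ∈ Finset.range (i + 1), ∑ l ∈ Finset.range (j + 1),
        (skill.map (fun s => diffC s (k : Int) (l : Int))).sum) =
      tot skill (i : Int) (j : Int) := by
  induction skill with
  | nil => simp [tot]
  | cons s rest ih =>
    simp only [List.map_cons, List.sum_cons, tot]
    have hr := ih (fun s hm => hsk s (List.mem_cons_of_mem _ hm))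
    simp only [tot] at hr
    rw [sum_sum_add (i + 1) (j + 1) (fun k l => diffC s (k : Int) (l : Int))
        (fun k l => (rest.map (fun s => diffC s (k : Int) (l : Int))).sum),
       sum_sum_diffC_one N M s (hsk s (by simp)) i j, hr]

theorem countP_getD (row : List Int) (prd : Int → Bool) :
    row.countP prd = ∑ j ∈ Finset.range row.length, if prd (row.getD j 0) then 1 else 0 := by
  induction row with
  | nil => simp
  | cons x xs ih =>
    rw [List.countP_cons, List.length_cons, Finset.sum_range_succ']
    simp only [List.getD_cons_succ, List.getD_cons_zero]
    rw [← ih]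

theorem map_sum_getD (b : List (List Int)) (f : List Int → Nat) :
    (b.map f).sum = ∑ i ∈ Finset.range b.length, f (b.getD i []) := by
  induction b with
  | nil => simp
  | cons r rs ih =>
    rw [List.map_cons, List.sum_cons, List.length_cons, Finset.sum_range_succ']
    simp only [List.getD_cons_succ, List.getD_cons_zero]
    rw [← ih]
    ring

theorem rowAddAux (row : List Int) (cn : Nat) (d : Int) :
    ∀ K : Nat, cn + K ≤ row.length →
      ((List.range K).foldl
          (fun r (k : Nat) => PySem.List.pySetD r ((cn : Int) + (k : Int))
            (PySem.List.pyGetD r ((cn : Int) + (k : Int)) 0 + d)) row).length = row.length ∧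
      ∀ j : Nat,
        ((List.range K).foldl
            (fun r (k : Nat) => PySem.List.pySetD r ((cn : Int) + (k : Int))
              (PySem.List.pyGetD r ((cn : Int) + (k : Int)) 0 + d)) row).getD j 0 =
          row.getD j 0 + if cn ≤ j ∧ j < cn + K then d else 0 := by
  intro K
  induction K with
  | zero =>
    intro _
    refine ⟨rfl, fun j => ?_⟩
    rw [if_neg (by omega)]
    simp
  | succ K ihK =>
    intro hK
    obtain ⟨hlen, hval⟩ := ihK (by omega)
    rw [List.range_succ, List.foldl_append, List.foldl_cons, List.foldl_nil]
    have hcast : (cn : Int) + (K : Int) = ((cn + K : Nat) : Int) := by push_cast; ring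
    rw [hcast, PySem.List.pySetD_natCast, PySem.List.pyGetD_natCast]
    refine ⟨by rw [List.length_set, hlen], fun j => ?_⟩
    rw [getD_set'', hlen]
    by_cases hj : cn + K = j
    · subst hj
      rw [if_pos ⟨rfl, by omega⟩, hval (cn + K), if_neg (by omega), if_pos (by omega)]
      ring
    · rw [if_neg (fun hc => hj hc.1), hval j]
      by_cases h2 : cn ≤ j ∧ j < cn + K
      · rw [if_pos h2, if_pos (by omega)]
      · rw [if_neg h2, if_neg (by omega)]

theorem pvRowAdd_val (row : List Int) (c1 c2 d : Int) (h1 : 0 ≤ c1) (h2 : c1 - 1 ≤ c2)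
    (h3 : c2 < (row.length : Int)) :
    (pvRowAdd row c1 c2 d).length = row.length ∧
    ∀ j : Nat, (pvRowAdd row c1 c2 d).getD j 0 =
      row.getD j 0 + if c1 ≤ (j : Int) ∧ (j : Int) ≤ c2 then d else 0 := by
  obtain ⟨cn, rfl⟩ : ∃ k : Nat, c1 = (k : Int) := ⟨c1.toNat, (Int.toNat_of_nonneg h1).symm⟩
  unfold pvRowAdd
  rw [PySem.List.pyRange_one, List.foldl_map]
  set K := ((c2 + 1) - (cn : Int)).toNat with hKdef
  have hKc : ((K : Nat) : Int) = c2 + 1 - (cn : Int) := by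
    rw [hKdef]; omega
  have haux := rowAddAux row cn d K (by omega)
  refine ⟨haux.1, fun j => ?_⟩
  rw [haux.2 j]
  by_cases hc : (cn : Int) ≤ (j : Int) ∧ (j : Int) ≤ c2
  · rw [if_pos (by omega), if_pos hc]
  · rw [if_neg (by omega), if_neg hc]

theorem rectAddAux (N M : Nat) (b : List (List Int)) (hb : Shape b N M) (rn : Nat)
    (c1 c2 d : Int) (hc1 : 0 ≤ c1) (hc12 : c1 - 1 ≤ c2) (hc2M : c2 < (M : Int)) :
    ∀ K : Nat, rn + K ≤ N →
      Shape ((List.range K).foldl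
          (fun q (k : Nat) => PySem.List.pySetD q ((rn : Int) + (k : Int))
            (pvRowAdd (PySem.List.pyGetD q ((rn : Int) + (k : Int)) []) c1 c2 d)) b) N M ∧
      ∀ i j : Nat,
        g2 ((List.range K).foldl
            (fun q (k : Nat) => PySem.List.pySetD q ((rn : Int) + (k : Int))
              (pvRowAdd (PySem.List.pyGetD q ((rn : Int) + (k : Int)) []) c1 c2 d)) b) i j =
          g2 b i j +
            if rn ≤ i ∧ i < rn + K ∧ c1 ≤ (j : Int) ∧ (j : Int) ≤ c2 then d else 0 := by
  intro K
  induction K with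
  | zero =>
    intro _
    refine ⟨hb, fun i j => ?_⟩
    rw [if_neg (by omega)]
    simp
  | succ K ihK =>
    intro hK
    obtain ⟨⟨hlen, hrows⟩, hval⟩ := ihK (by omega)
    rw [List.range_succ, List.foldl_append, List.foldl_cons, List.foldl_nil]
    set q := (List.range K).foldl
      (fun q (k : Nat) => PySem.List.pySetD q ((rn : Int) + (k : Int))
        (pvRowAdd (PySem.List.pyGetD q ((rn : Int) + (k : Int)) []) c1 c2 d)) b with hq
    have hcast : (rn : Int) + (K : Int) = ((rn + K : Nat) : Int) := by push_cast; ring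
    rw [hcast, PySem.List.pySetD_natCast, PySem.List.pyGetD_natCast]
    have hrowlen : M ≤ (q.getD (rn + K) []).length := hrows (rn + K) (by omega)
    have hrow := pvRowAdd_val (q.getD (rn + K) []) c1 c2 d hc1 hc12 (by
      have : ((M : Nat) : Int) ≤ ((q.getD (rn + K) []).length : Int) := by exact_mod_cast hrowlen
      omega)
    refine ⟨⟨by rw [List.length_set, hlen], ?_⟩, ?_⟩
    · intro i hi
      rw [getD_set'', hlen]
      by_cases hij : rn + K = i
      · rw [if_pos ⟨hij, by omega⟩, hrow.1]
        exact hrowlen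
      · rw [if_neg (fun hc => hij hc.1)]
        exact hrows i hi
    · intro i j
      unfold g2
      rw [getD_set'', hlen]
      by_cases hij : rn + K = i
      · subst hij
        rw [if_pos ⟨rfl, by omega⟩, hrow.2 j]
        have hgq : (q.getD (rn + K) []).getD j 0 = g2 q (rn + K) j := rfl
        rw [hgq, hval (rn + K) j, if_neg (by omega)]
        by_cases hc : c1 ≤ (j : Int) ∧ (j : Int) ≤ c2
        · rw [if_pos hc, if_pos (by omega)]
          simp only [g2]
          ring
        · rw [if_neg hc, if_neg (by omega)]
          simp only [g2]
          ring
      · rw [if_neg (fun hc => hij hc.1)]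
        have hgq : (q.getD i []).getD j 0 = g2 q i j := rfl
        rw [hgq, hval i j]
        by_cases hc : rn ≤ i ∧ i < rn + K ∧ c1 ≤ (j : Int) ∧ (j : Int) ≤ c2
        · rw [if_pos hc, if_pos (by omega)]
          simp only [g2]
        · rw [if_neg hc, if_neg (by omega)]
          simp only [g2]

theorem pvRectAdd_val (N M : Nat) (b : List (List Int)) (hb : Shape b N M)
    (r1 c1 r2 c2 d : Int) (hr1 : 0 ≤ r1) (hr12 : r1 - 1 ≤ r2) (hr2N : r2 < (N : Int))
    (hr1N : r1 ≤ (N : Int)) (hc1 : 0 ≤ c1) (hc12 : c1 - 1 ≤ c2) (hc2M : c2 < (M : Int)) :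
    Shape (pvRectAdd b r1 c1 r2 c2 d) N M ∧
    ∀ i j : Nat, g2 (pvRectAdd b r1 c1 r2 c2 d) i j =
      g2 b i j +
        if r1 ≤ (i : Int) ∧ (i : Int) ≤ r2 ∧ c1 ≤ (j : Int) ∧ (j : Int) ≤ c2 then d else 0 := by
  obtain ⟨rn, rfl⟩ : ∃ k : Nat, r1 = (k : Int) := ⟨r1.toNat, (Int.toNat_of_nonneg hr1).symm⟩
  unfold pvRectAdd
  rw [PySem.List.pyRange_one, List.foldl_map]
  set K := ((r2 + 1) - (rn : Int)).toNat with hKdef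
  have hKc : ((K : Nat) : Int) = r2 + 1 - (rn : Int) := by
    rw [hKdef]; omega
  have haux := rectAddAux N M b hb rn c1 c2 d hc1 hc12 hc2M K (by omega)
  refine ⟨haux.1, fun i j => ?_⟩
  rw [haux.2 i j]
  by_cases hc : (rn : Int) ≤ (i : Int) ∧ (i : Int) ≤ r2 ∧ c1 ≤ (j : Int) ∧ (j : Int) ≤ c2
  · rw [if_pos (by omega), if_pos hc]
  · rw [if_neg (by omega), if_neg hc]

theorem phaseB (N M : Nat) (skill : List (List Int))
    (hsk : ∀ s ∈ skill, SkillOK (N : Int) (M : Int) s) :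
    ∀ b, Shape b N M →
      Shape (skill.foldl pvSkillStepB b) N M ∧
      ∀ i j : Nat, g2 (skill.foldl pvSkillStepB b) i j =
        g2 b i j + tot skill (i : Int) (j : Int) := by
  induction skill with
  | nil => intro b hb; exact ⟨hb, fun i j => by simp [tot]⟩
  | cons s rest ih =>
    intro b hb
    have hs := hsk s (by simp)
    obtain ⟨t, r1, c1, r2, c2, d, rfl⟩ := skill_shape s hs.1
    obtain ⟨-, ht, hr10, hr12, hr2N, hr1N, hc10, hc12, hc2M, hc1M⟩ := hs
    simp only [List.getD_cons_zero, List.getD_cons_succ] at ht hr10 hr12 hr2N hr1N hc10 hc12 hc2M hc1M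
    have hstep : pvSkillStepB b [t, r1, c1, r2, c2, d] =
        pvRectAdd b r1 c1 r2 c2 (sgn t * d) := by
      simp only [pvSkillStepB, sgn_mul]
    have hrect := pvRectAdd_val N M b hb r1 c1 r2 c2 (sgn t * d)
      hr10 hr12 hr2N hr1N hc10 hc12 hc2M
    have hq : Shape (pvSkillStepB b [t, r1, c1, r2, c2, d]) N M := by
      rw [hstep]; exact hrect.1
    have hrest := ih (fun s hm => hsk s (List.mem_cons_of_mem _ hm)) _ hq
    refine ⟨hrest.1, ?_⟩
    intro i j
    rw [List.foldl_cons, hrest.2 i j, hstep, hrect.2 i j]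
    simp only [tot, List.map_cons, List.sum_cons]
    have : addC [t, r1, c1, r2, c2, d] (i : Int) (j : Int) =
        if r1 ≤ (i : Int) ∧ (i : Int) ≤ r2 ∧ c1 ≤ (j : Int) ∧ (j : Int) ≤ c2
        then sgn t * d else 0 := rfl
    rw [this]
    ring

theorem cellLoopAux (N M : Nat) (p3 skill board : List (List Int))
    (hF : ∀ i j : Nat, i < N → j < M →
      pvGetI p3 (i : Int) (j : Int) = tot skill (i : Int) (j : Int))
    (ii : Nat) (hii : ii < N) (b : List (List Int)) (a : Int)
    (hS : Shape b N M) (hbrow : ∀ j : Nat, g2 b ii j = g2 board ii j) :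
    ∀ u : Nat, u ≤ M →
      Shape ((PySem.List.pyRange 0 (u : Int) 1).foldl (pvCellStep p3 (ii : Int)) (b, a)).1 N M ∧
      (∀ i j : Nat,
        g2 ((PySem.List.pyRange 0 (u : Int) 1).foldl (pvCellStep p3 (ii : Int)) (b, a)).1 i j =
          g2 b i j + if i = ii ∧ j < u then tot skill (ii : Int) (j : Int) else 0) ∧
      ((PySem.List.pyRange 0 (u : Int) 1).foldl (pvCellStep p3 (ii : Int)) (b, a)).2 =
        a + ∑ j ∈ Finset.range u,
          (if 0 < g2 board ii j + tot skill (ii : Int) (j : Int) then (1 : Int) else 0) := by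
  intro u
  induction u with
  | zero =>
    intro _
    rw [show ((0 : Nat) : Int) = 0 by simp, PySem.List.pyRange_one_eq_nil (le_refl 0)]
    refine ⟨hS, fun i j => by simp only [List.foldl_nil]; rw [if_neg (by omega)]; ring, by simp⟩
  | succ u ihu =>
    intro ht
    obtain ⟨hSt, hcell, hans⟩ := ihu (by omega)
    have hsplit : PySem.List.pyRange 0 ((u + 1 : Nat) : Int) 1 =
        PySem.List.pyRange 0 (u : Int) 1 ++ [(u : Int)] := by
      rw [show (((u + 1 : Nat)) : Int) = (u : Int) + 1 by push_cast; ring]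
      exact PySem.List.pyRange_one_succ_right (by positivity)
    rw [hsplit, List.foldl_append]
    set st := (PySem.List.pyRange 0 (u : Int) 1).foldl (pvCellStep p3 (ii : Int)) (b, a) with hst
    simp only [List.foldl_cons, List.foldl_nil, pvCellStep]
    have hv := hF ii u hii (by omega)
    have hb := g2_pvBump hSt (ii : Int) (u : Int) (by positivity) (by omega)
      (by positivity) (by omega) (pvGetI p3 (ii : Int) (u : Int))
    have hread : g2 (pvBump st.1 (ii : Int) (u : Int) (pvGetI p3 (ii : Int) (u : Int))) ii u =
        g2 board ii u + tot skill (ii : Int) (u : Int) := by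
      rw [hb.2 ii u, if_pos ⟨rfl, rfl⟩, hcell ii u, if_neg (by omega), hv, hbrow u]
      ring
    refine ⟨hb.1, ?_, ?_⟩
    · intro i j
      rw [hb.2 i j, hcell i j, hv]
      split_ifs
      all_goals try (exfalso; omega)
      all_goals try ring
      all_goals
        (have h'' : j = u := by omega
         subst h''
         ring)
    · rw [pvGetI_natCast, hread, hans, Finset.sum_range_succ]
      by_cases hpos : 0 < g2 board ii u + tot skill (ii : Int) (u : Int)
      · rw [if_pos hpos, if_pos hpos]
        ring
      · rw [if_neg hpos, if_neg hpos]
        ring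

theorem countOuter (N M : Nat) (p3 skill board : List (List Int)) (hbS : Shape board N M)
    (hF : ∀ i j : Nat, i < N → j < M →
      pvGetI p3 (i : Int) (j : Int) = tot skill (i : Int) (j : Int)) :
    ∀ t : Nat, t ≤ N →
      Shape ((PySem.List.pyRange 0 (t : Int) 1).foldl (pvCountRow (M : Int) p3) (board, (0 : Int))).1 N M ∧
      (∀ i j : Nat,
        g2 ((PySem.List.pyRange 0 (t : Int) 1).foldl (pvCountRow (M : Int) p3) (board, (0 : Int))).1 i j =
          g2 board i j + if i < t ∧ j < M then tot skill (i : Int) (j : Int) else 0) ∧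
      ((PySem.List.pyRange 0 (t : Int) 1).foldl (pvCountRow (M : Int) p3) (board, (0 : Int))).2 =
        ∑ i ∈ Finset.range t, ∑ j ∈ Finset.range M,
          (if 0 < g2 board i j + tot skill (i : Int) (j : Int) then (1 : Int) else 0) := by
  intro t
  induction t with
  | zero =>
    intro _
    rw [show ((0 : Nat) : Int) = 0 by simp, PySem.List.pyRange_one_eq_nil (le_refl 0)]
    refine ⟨hbS, fun i j => by simp only [List.foldl_nil]; rw [if_neg (by omega)]; ring, by simp⟩
  | succ t iht =>
    intro ht
    obtain ⟨hSt, hcell, hans⟩ := iht (by omega)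
    have hsplit : PySem.List.pyRange 0 ((t + 1 : Nat) : Int) 1 =
        PySem.List.pyRange 0 (t : Int) 1 ++ [(t : Int)] := by
      rw [show (((t + 1 : Nat)) : Int) = (t : Int) + 1 by push_cast; ring]
      exact PySem.List.pyRange_one_succ_right (by positivity)
    rw [hsplit, List.foldl_append]
    set st := (PySem.List.pyRange 0 (t : Int) 1).foldl (pvCountRow (M : Int) p3) (board, (0 : Int)) with hst
    simp only [List.foldl_cons, List.foldl_nil]
    have hbrow : ∀ j : Nat, g2 st.1 t j = g2 board t j := by
      intro j
      rw [hcell t j, if_neg (by omega)]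
      ring
    have hrow := cellLoopAux N M p3 skill board hF t (by omega) st.1 st.2 hSt hbrow M (le_refl M)
    have hpv : pvCountRow (M : Int) p3 st (t : Int) =
        (PySem.List.pyRange 0 (M : Int) 1).foldl (pvCellStep p3 (t : Int)) (st.1, st.2) := rfl
    rw [hpv]
    refine ⟨hrow.1, ?_, ?_⟩
    · intro i j
      rw [hrow.2.1 i j, hcell i j]
      split_ifs
      all_goals try (exfalso; omega)
      all_goals try ring
      all_goals
        (have h' : i = t := by omega
         subst h'
         ring)
    · rw [hrow.2.2, hans, Finset.sum_range_succ]

theorem shape_replicate (N M : Nat) :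
    Shape (List.replicate (N + 1) (List.replicate (M + 1) (0 : Int))) (N + 1) (M + 1) := by
  refine ⟨by simp, ?_⟩
  intro i hi
  rw [List.getD_eq_getElem?_getD, List.getElem?_replicate]
  simp [hi]

theorem getD_take_of_lt (row : List Int) (Mn j : Nat) (hj : j < Mn) :
    (row.take Mn).getD j 0 = row.getD j 0 := by
  rw [List.getD_eq_getElem?_getD, List.getD_eq_getElem?_getD, List.getElem?_take]
  rw [if_pos hj]

theorem g2_replicate (N M : Nat) (i j : Nat) :
    g2 (List.replicate (N + 1) (List.replicate (M + 1) (0 : Int))) i j = 0 := by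
  unfold g2
  have h1 : (List.replicate (N + 1) (List.replicate (M + 1) (0 : Int))).getD i [] =
      if i < N + 1 then List.replicate (M + 1) (0 : Int) else [] := by
    rw [List.getD_eq_getElem?_getD, List.getElem?_replicate]
    split_ifs <;> simp
  rw [h1]
  split_ifs with h
  · rw [List.getD_eq_getElem?_getD, List.getElem?_replicate]
    split_ifs <;> simp
  · simp

theorem cnt_A (board skill : List (List Int))
    (hrect : ∀ i < board.length, (board.getD 0 []).length ≤ (board.getD i []).length)
    (hsk : ∀ s ∈ skill,
      SkillOK (board.length : Int) ((board.getD 0 []).length : Int) s) :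
    solution board skill =
      ∑ i ∈ Finset.range board.length, ∑ j ∈ Finset.range (board.getD 0 []).length,
        (if 0 < g2 board i j + tot skill (i : Int) (j : Int) then (1 : Int) else 0) := by
  set N := board.length with hN
  set M := (board.getD 0 []).length with hM
  have hn : PySem.List.len board = (N : Int) := by rw [PySem.List.len_eq, hN]
  have hm : PySem.List.len (PySem.List.pyGetD board 0 []) = (M : Int) := by
    rw [PySem.List.pyGetD_zero, PySem.List.len_eq, hM]
  have htn : ((N : Int) + 1).toNat = N + 1 := by omega
  have htm : ((M : Int) + 1).toNat = M + 1 := by omega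
  simp only [solution, hn, hm, htn, htm]
  set p0 := List.replicate (N + 1) (List.replicate (M + 1) (0 : Int)) with hp0
  set p1 := skill.foldl pvSkillStepA p0 with hp1
  set p2 := (PySem.List.pyRange 0 (N : Int) 1).foldl (pvRowLoop (M : Int)) p1 with hp2
  set p3 := (PySem.List.pyRange 0 (M : Int) 1).foldl (pvColLoop (N : Int)) p2 with hp3
  have hA1 := phaseA1 N M skill hsk p0 (shape_replicate N M)
  have hA2 := phaseA2 N M p1 hA1.1 N (le_refl N)
  have hA3 := phaseA3 N M p2 hA2.1 M (le_refl M)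
  have hF : ∀ i j : Nat, i < N → j < M →
      pvGetI p3 (i : Int) (j : Int) = tot skill (i : Int) (j : Int) := by
    intro i j hi hj
    rw [pvGetI_natCast, hA3.2 i j, if_pos ⟨hj, by omega⟩]
    have h2 : ∀ k ∈ Finset.range (i + 1),
        g2 p2 k j = ∑ l ∈ Finset.range (j + 1), g2 p1 k l := by
      intro k hk
      rw [hA2.2 k j, if_pos ⟨by simp at hk; omega, by omega⟩]
    rw [Finset.sum_congr rfl h2]
    have h1 : ∀ k ∈ Finset.range (i + 1), ∀ l ∈ Finset.range (j + 1),
        g2 p1 k l = (skill.map (fun s => diffC s (k : Int) (l : Int))).sum := by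
      intro k hk l hl
      rw [hA1.2 k l (by simp at hk; omega) (by simp at hl; omega), g2_replicate]
      ring
    rw [Finset.sum_congr rfl fun k hk => Finset.sum_congr rfl (h1 k hk)]
    exact sum_sum_diffC N M skill hsk i j
  have hout := countOuter N M p3 skill board ⟨rfl, hrect⟩ hF N (le_refl N)
  exact hout.2.2

theorem cnt_B (board skill : List (List Int))
    (hrect : ∀ i < board.length, (board.getD 0 []).length ≤ (board.getD i []).length)
    (hsk : ∀ s ∈ skill,
      SkillOK (board.length : Int) ((board.getD 0 []).length : Int) s) :
    solution_alt board skill =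
      ∑ i ∈ Finset.range board.length, ∑ j ∈ Finset.range (board.getD 0 []).length,
        (if 0 < g2 board i j + tot skill (i : Int) (j : Int) then (1 : Int) else 0) := by
  set N := board.length with hN
  set M := (board.getD 0 []).length with hM
  have hB := phaseB N M skill hsk board ⟨rfl, hrect⟩
  have hm : PySem.List.len (PySem.List.pyGetD board 0 []) = (M : Int) := by
    rw [PySem.List.pyGetD_zero, PySem.List.len_eq, hM]
  simp only [solution_alt, hm]
  set bfin := skill.foldl pvSkillStepB board with hbfin
  rw [map_sum_getD, hB.1.1]
  have hrow : ∀ i ∈ Finset.range N,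
      (PySem.List.slice (bfin.getD i []) none (some (M : Int))).countP (fun v => decide (v > 0)) =
        ∑ j ∈ Finset.range M, if (bfin.getD i []).getD j 0 > 0 then 1 else 0 := by
    intro i hi
    rw [PySem.List.slice_to_natCast]
    have hlen : ((bfin.getD i []).take M).length = M := by
      rw [List.length_take]
      have := hB.1.2 i (by simp at hi; omega)
      omega
    rw [countP_getD, hlen]
    refine Finset.sum_congr rfl fun j hj => ?_
    rw [getD_take_of_lt _ M j (by simp at hj; omega)]
    simp
  rw [Finset.sum_congr rfl hrow]
  rw [Int.ofNat_eq_natCast, Nat.cast_sum]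
  refine Finset.sum_congr rfl fun i hi => ?_
  rw [Nat.cast_sum]
  refine Finset.sum_congr rfl fun j hj => ?_
  have hcell : (bfin.getD i []).getD j 0 = g2 board i j + tot skill (i : Int) (j : Int) :=
    hB.2 i j
  by_cases h : 0 < g2 board i j + tot skill (i : Int) (j : Int)
  · rw [if_pos (by rw [hcell]; exact h), if_pos h]
    simp
  · rw [if_neg (by rw [hcell]; exact h), if_neg h]
    simp

-- ===== VERDICT (by name: the statement is the Claim_ definition above) =====
theorem solution_spec : Claim_equal_solution := by
  unfold Claim_equal_solution
  intro board skill _ hpre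
  obtain ⟨hne, hrect, hsk⟩ := hpre
  unfold Spec_solution
  rw [cnt_A board skill hrect hsk, cnt_B board skill hrect hsk]
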